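-- pv_equiv track=rewrite | github.com/hannayangg/penwing | # ridi/73.py | F
-- ===== SOURCE A (Python) =====
-- def F(data):
--   def _F(nums): # 바이트 수 = 1의 개수
--     p = 0
--     while p < len(nums) and nums[p] == '1':
--       p += 1
--     return p
--
--   while data:
--     p = data.pop(0)
--     b = "{0:b}".format(p).zfill(8)
--     bites = _F(b)
--
--     if (bites > 4) or (bites == 1 and b[0] == '1'): # 가능한 바이트 수: 1~4
--       return False
--     for _ in range(bites-1):
--       if not data or "{0:b}".format(data[0]).zfill(8)[:2] != '10':
--         return False
--       data.pop(0)
--   return True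
-- ===== SOURCE B (Python) =====
-- def F(data):
--     # Single flat pass maintaining `need` = continuation bytes still expected.
--     # NOTE: A empties its argument via pop(0); this version does not mutate `data`
--     # (return-value equivalence only).
--     need = 0
--     for p in data:
--         b = "{0:b}".format(p).zfill(8)
--         if need:
--             if b[:2] != '10':
--                 return False
--             need -= 1
--         else:
--             bites = len(b) - len(b.lstrip('1'))
--             if bites == 1 or bites > 4:
--                 return False
--             if bites:
--                 need = bites - 1
--     return need == 0
-- ===== Notes on version B (the rewrite author's own statement) =====
-- stated objective: faster
-- what changed: Replaces A's destructive nested loops (pop(0) per byte, an inner pop(0) loop per multi-byte leader) with one non-mutating flat pass carrying a `need` counter of expected continuation bytes.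
import Mathlib
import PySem

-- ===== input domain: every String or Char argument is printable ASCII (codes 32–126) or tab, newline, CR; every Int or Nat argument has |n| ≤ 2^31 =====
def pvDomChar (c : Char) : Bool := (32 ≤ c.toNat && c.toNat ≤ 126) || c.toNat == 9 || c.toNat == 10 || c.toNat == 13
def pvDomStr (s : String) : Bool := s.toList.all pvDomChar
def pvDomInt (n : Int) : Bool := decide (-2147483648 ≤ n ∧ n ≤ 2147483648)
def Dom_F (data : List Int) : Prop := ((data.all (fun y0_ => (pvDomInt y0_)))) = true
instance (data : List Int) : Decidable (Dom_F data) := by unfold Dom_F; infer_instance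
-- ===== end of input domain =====

-- B replaces A's nested pop(0) loops by one flat pass with a `need` counter
-- (no quadratic front-pops); A empties `data` in place, B does not mutate it:
-- the equivalence proved is about the return value only.

-- ===== PORT A =====
-- "{0:b}".format(n) for n ≥ 0, as a list of chars (msb first); exact for Nat
def natBinAux : Nat → List Char → List Char
  | 0, acc => acc
  | n+1, acc => natBinAux ((n+1)/2) ((if (n+1) % 2 = 1 then '1' else '0') :: acc)
decreasing_by exact Nat.div_lt_self (Nat.succ_pos n) (by omega)

def natBin (n : Nat) : List Char := if n = 0 then ['0'] else natBinAux n []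

-- "{0:b}".format(p): '-' prefix for negatives (Python formats sign then magnitude)
def binStr (p : Int) : List Char :=
  if p < 0 then '-' :: natBin (-p).toNat else natBin p.toNat

-- .zfill(8): pad with '0' to width 8, keeping a leading sign in front (Python zfill)
def zfill8 (s : List Char) : List Char :=
  if 8 ≤ s.length then s
  else match s with
    | [] => List.replicate 8 '0'
    | c :: t =>
      if c = '-' ∨ c = '+' then c :: (List.replicate (8 - s.length) '0' ++ t)
      else List.replicate (8 - s.length) '0' ++ s

-- A's inner _F: while p < len(nums) and nums[p] == '1': p += 1
def leadA : List Char → Nat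
  | [] => 0
  | c :: t => if c = '1' then leadA t + 1 else 0

-- A's inner for-loop: pop `k` continuation bytes, each with zfilled prefix '10'
def consume : Nat → List Int → Option (List Int)
  | 0, d => some d
  | _+1, [] => none
  | k+1, p :: rest =>
    if (zfill8 (binStr p)).take 2 = ['1', '0'] then consume k rest else none

theorem consume_le : ∀ (k : Nat) (d r : List Int), consume k d = some r → r.length ≤ d.length := by
  intro k
  induction k with
  | zero => intro d r hdr; simp only [consume, Option.some.injEq] at hdr; simp [hdr]
  | succ k ih =>
    intro d r h
    cases d with
    | nil => simp [consume] at h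
    | cons p rest =>
      simp only [consume] at h
      split at h
      · have := ih rest r h; simp; omega
      · exact absurd h (by simp)

def F (data : List Int) : Bool :=
  match data with
  | [] => true
  | p :: rest =>
    let b := zfill8 (binStr p)
    let bites := leadA b
    if 4 < bites ∨ (bites = 1 ∧ b.head? = some '1') then false
    else
      match h : consume (bites - 1) rest with
      | none => false
      | some r => F r
termination_by data.length
decreasing_by
  have := consume_le (bites - 1) rest r h
  simp; omega

-- ===== PORT B =====
-- flat loop state: `need` = continuation bytes still expected
def goB : Nat → List Int → Bool
  | need, [] => need == 0
  | need, p :: rest =>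
    let b := zfill8 (binStr p)
    if need ≠ 0 then
      if b.take 2 = ['1', '0'] then goB (need - 1) rest else false
    else
      let bites := b.length - (b.dropWhile (· == '1')).length
      if bites = 1 ∨ 4 < bites then false
      else goB (bites - 1) rest

def F_alt (data : List Int) : Bool := goB 0 data

-- ===== PRECONDITION & SPEC =====
def Spec_F (data : List Int) (out : Bool) : Prop := out = F_alt data
instance (data : List Int) (out : Bool) : Decidable (Spec_F data out) := by unfold Spec_F; infer_instance

-- ===== CLAIM (what is proved, stated in full; the proofs are below) =====
def Claim_equal_F : Prop := ∀ (data : List Int), Dom_F data → Spec_F data (F data)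

-- ===== LEMMAS AND PROOFS =====

-- A's while-count equals the takeWhile length
theorem leadA_eq_takeWhile (l : List Char) : leadA l = (l.takeWhile (· == '1')).length := by
  induction l with
  | nil => rfl
  | cons c t ih =>
    by_cases h : c = '1'
    · simp [leadA, List.takeWhile, h, ih]
    · simp [leadA, h]

-- B's lstrip-based count equals the same takeWhile length
theorem lenSubDrop (l : List Char) :
    l.length - (l.dropWhile (· == '1')).length = (l.takeWhile (· == '1')).length := by
  have h := List.takeWhile_append_dropWhile (p := (· == '1')) (l := l)
  have : (l.takeWhile (· == '1')).length + (l.dropWhile (· == '1')).length = l.length := by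
    conv_rhs => rw [← h]
    exact (List.length_append).symm
  omega

theorem leadA_one_head (l : List Char) (h : leadA l = 1) : l.head? = some '1' := by
  cases l with
  | nil => simp [leadA] at h
  | cons c t =>
    simp only [leadA] at h
    split at h
    · simp_all
    · omega

-- the bridge: goB with `need = k` is A's consume-then-continue
theorem goB_consume : ∀ (d : List Int) (k : Nat),
    goB k d = (match consume k d with | none => false | some r => F r) := by
  intro d
  induction hn : d.length using Nat.strong_induction_on generalizing d with
  | _ n ih =>
    intro k
    cases d with
    | nil =>
      cases k with
      | zero => simp [goB, consume, F]
      | succ k => simp [goB, consume]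
    | cons p rest =>
      cases k with
      | succ k =>
        simp only [goB, consume, ne_eq, Nat.succ_ne_zero, not_false_eq_true, if_true,
          Nat.add_sub_cancel]
        split
        · exact ih rest.length (by simp [← hn]) rest rfl k
        · rfl
      | zero =>
        have hc : consume 0 (p :: rest) = some (p :: rest) := rfl
        rw [hc]
        show goB 0 (p :: rest) = F (p :: rest)
        conv_rhs => rw [F.eq_def]
        simp only [goB, ne_eq, not_true_eq_false, if_false]
        have hb : (zfill8 (binStr p)).length - ((zfill8 (binStr p)).dropWhile (· == '1')).length
            = leadA (zfill8 (binStr p)) := by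
          rw [lenSubDrop, leadA_eq_takeWhile]
        rw [hb]
        set b := zfill8 (binStr p) with hbdef
        set bites := leadA b with hbites
        by_cases h1 : bites = 1 ∨ 4 < bites
        · have h2 : 4 < bites ∨ (bites = 1 ∧ b.head? = some '1') := by
            rcases h1 with h1 | h1
            · exact Or.inr ⟨h1, leadA_one_head b h1⟩
            · exact Or.inl h1
          simp [h1, h2]
        · have h2 : ¬(4 < bites ∨ (bites = 1 ∧ b.head? = some '1')) := by
            push Not at h1 ⊢
            exact ⟨h1.2, fun h => absurd h h1.1⟩
          simp only [h1, h2, reduceIte]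
          rw [ih rest.length (by simp [← hn]) rest rfl (bites - 1)]
          cases hcc : consume (bites - 1) rest <;> simp

-- ===== VERDICT (by name: the statement is the Claim_ definition above) =====
theorem F_spec : Claim_equal_F := by
  intro data _
  unfold Spec_F F_alt
  rw [goB_consume data 0]
  simp [consume]
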